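-- pv_equiv track=rewrite | github.com/manmenmishiikun/Smash-Arena-ID-Scanner | image_processor.py | _expand_o_variants
-- ===== SOURCE A (Python) =====
-- MAX_O_BRANCH_POSITIONS: int = 6
--
-- def _expand_o_variants(s: str) -> list[str]:
--     """O を Q または 0 に置いた文字列の組み合わせを列挙。"""
--     if "O" not in s:
--         return [s]
--     idxs = [i for i, c in enumerate(s) if c == "O"]
--     if len(idxs) > MAX_O_BRANCH_POSITIONS:
--         idxs = idxs[:MAX_O_BRANCH_POSITIONS]
--     out: list[str] = []
--     for mask in range(1 << len(idxs)):
--         chars = list(s)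
--         for bit, pos in enumerate(idxs):
--             chars[pos] = "Q" if (mask >> bit) & 1 else "0"
--         out.append("".join(chars))
--     return out
-- ===== SOURCE B (Python) =====
-- MAX_O_BRANCH_POSITIONS: int = 6
--
-- def _expand_o_variants(s: str) -> list[str]:
--     """O を Q または 0 に置いた文字列の組み合わせを列挙。"""
--     if "O" not in s:
--         return [s]
--     idxs = [i for i, c in enumerate(s) if c == "O"][:MAX_O_BRANCH_POSITIONS]
--
--     def combos(k: int) -> list[list[str]]:
--         if k == 0:
--             return [[]]
--         rest = combos(k - 1)
--         return [asgn + [c] for c in "0Q" for asgn in rest]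
--
--     out: list[str] = []
--     for asgn in combos(len(idxs)):
--         chars = list(s)
--         for pos, c in zip(idxs, asgn):
--             chars[pos] = c
--         out.append("".join(chars))
--     return out
-- ===== Notes on version B (the rewrite author's own statement) =====
-- stated objective: alternative
-- what changed: Replaces the integer-bitmask loop (mask in range(1<<k) with bit tests selecting each replacement character) by a recursive enumeration of choice-tuples over the O-positions (first position varying fastest) that are spliced into the string.
import Mathlib
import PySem

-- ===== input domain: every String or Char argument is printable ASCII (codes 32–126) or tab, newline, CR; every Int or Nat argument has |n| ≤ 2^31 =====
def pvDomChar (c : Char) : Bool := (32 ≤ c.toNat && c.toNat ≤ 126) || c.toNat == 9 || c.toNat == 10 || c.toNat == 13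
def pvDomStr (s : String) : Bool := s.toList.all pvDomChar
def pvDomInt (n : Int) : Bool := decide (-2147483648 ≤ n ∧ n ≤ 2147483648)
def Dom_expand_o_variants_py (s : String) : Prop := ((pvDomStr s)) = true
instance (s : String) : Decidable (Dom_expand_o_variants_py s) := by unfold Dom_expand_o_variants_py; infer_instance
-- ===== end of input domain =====

-- B replaces A's integer-bitmask enumeration by a recursive product of per-position choices (alternative algorithm, same cost).


-- ===== PORT A =====
-- Port note: list indices assigned by A are enumerate positions (always in range), so pySetD is exact;
-- shift amounts are enumerate positions, hence nonnegative, so `.toNat` on them is exact.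
def expand_o_variants_py (s : String) : List String :=
  if PySem.Str.isIn "O" s = false then [s]
  else
    let idxs0 := ((PySem.List.enumerate s.toList 0).filter (fun p => p.2 == 'O')).map (·.1)
    let idxs := if PySem.List.len idxs0 > 6 then PySem.List.slice idxs0 none (some 6) else idxs0
    (PySem.List.pyRange 0 ((1:Int) <<< idxs.length) 1).foldl
      (fun out mask =>
        let chars := (PySem.List.enumerate idxs 0).foldl
          (fun chars bp =>
            PySem.List.pySetD chars bp.2
              (if PySem.Int.band (mask >>> bp.1.toNat) 1 ≠ 0 then 'Q' else '0')) s.toList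
        out ++ [String.ofList chars]) []

-- ===== PORT B =====
-- combos(k) of Source B: all length-k choice lists over ['0','Q'], first position varying fastest
def pvCombos : Nat → List (List Char)
  | 0 => [[]]
  | k+1 => ['0', 'Q'].flatMap (fun c => (pvCombos k).map (fun asgn => asgn ++ [c]))

def expand_o_variants_py_alt (s : String) : List String :=
  if PySem.Str.isIn "O" s = false then [s]
  else
    let idxs := PySem.List.slice
      (((PySem.List.enumerate s.toList 0).filter (fun p => p.2 == 'O')).map (·.1)) none (some 6)
    (pvCombos idxs.length).foldl
      (fun out asgn =>
        out ++ [String.ofList ((idxs.zip asgn).foldl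
          (fun chars pc => PySem.List.pySetD chars pc.1 pc.2) s.toList)]) []

-- ===== PRECONDITION & SPEC =====
def Spec_expand_o_variants_py (s : String) (out : List String) : Prop := out = expand_o_variants_py_alt s
instance (s : String) (out : List String) : Decidable (Spec_expand_o_variants_py s out) := by unfold Spec_expand_o_variants_py; infer_instance

-- ===== CLAIM (what is proved, stated in full; the proofs are below) =====
def Claim_equal_expand_o_variants_py : Prop := ∀ (s : String), Dom_expand_o_variants_py s → Spec_expand_o_variants_py s (expand_o_variants_py s)

-- ===== LEMMAS AND PROOFS =====

lemma pvBand (n j : Nat) : PySem.Int.band ((n:Int) >>> j) 1 = (((n >>> j) % 2 : Nat) : Int) := by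
  rw [show ((n:Int) >>> j) = ((n >>> j : Nat) : Int) from rfl,
      show (1:Int) = ((1:Nat):Int) from rfl, PySem.Int.band_natCast, Nat.and_one_is_mod]

-- the choice character A assigns to bit j of mask n, at the Nat level
def pvChar (n j : Nat) : Char := if (n >>> j) % 2 ≠ 0 then 'Q' else '0'

-- A's inner loop over enumerate(idxs) is B's splice-fold over idxs zipped with the bit characters
lemma pvInner (idxs : List Int) (m : Int) (b : Nat) (cs : List Char) :
    (PySem.List.enumerate idxs (b:Int)).foldl
      (fun chars bp => PySem.List.pySetD chars bp.2
        (if PySem.Int.band (m >>> bp.1.toNat) 1 ≠ 0 then 'Q' else '0')) cs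
    = (idxs.zip ((List.range idxs.length).map
        (fun (j : Nat) => if PySem.Int.band (m >>> (b+j)) 1 ≠ 0 then 'Q' else '0'))).foldl
        (fun chars pc => PySem.List.pySetD chars pc.1 pc.2) cs := by
  induction idxs generalizing b cs with
  | nil => simp [PySem.List.enumerate_nil]
  | cons x xs ih =>
    simp only [PySem.List.enumerate_cons, List.length_cons, List.range_succ_eq_map,
      List.map_cons, List.map_map, List.zip_cons_cons, List.foldl_cons, Int.toNat_natCast,
      Nat.add_zero]
    rw [show ((b:Int) + 1) = (((b+1:Nat)):Int) by push_cast; ring, ih]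
    congr 2
    · simp only [Int.shiftRight_natCast_right]
    · refine List.map_congr_left (fun j _ => ?_)
      have h : b + 1 + j = b + j.succ := by omega
      simp [Function.comp, h]

lemma pvCharsOfMask (k n : Nat) :
    (List.range k).map (fun (j : Nat) => if PySem.Int.band ((n:Int) >>> j) 1 ≠ 0 then 'Q' else '0')
    = (List.range k).map (pvChar n) := by
  refine List.map_congr_left (fun j _ => ?_)
  rw [pvBand]
  simp only [pvChar, ne_eq, Nat.cast_eq_zero]

lemma pvChar_high (k n : Nat) (h : n < 2^k) : pvChar n k = '0' := by
  simp [pvChar, Nat.shiftRight_eq_div_pow, Nat.div_eq_of_lt h]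

lemma pvChar_high' (k n : Nat) (h : n < 2^k) : pvChar (2^k + n) k = 'Q' := by
  simp [pvChar, Nat.shiftRight_eq_div_pow, Nat.add_div_left, Nat.div_eq_of_lt h]

lemma pvChar_low (k n j : Nat) (hj : j < k) (_h : n < 2^k) :
    pvChar (2^k + n) j = pvChar n j := by
  have hd : 2^k = 2^j * 2^(k-j) := by rw [← pow_add]; congr 1; omega
  have h2 : 2 ∣ 2^(k-j) := dvd_pow_self 2 (by omega)
  simp only [pvChar, Nat.shiftRight_eq_div_pow]
  rw [hd, Nat.mul_add_div (Nat.two_pow_pos j)]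
  obtain ⟨t, ht⟩ := h2
  have hmod : (2^(k-j) + n / 2^j) % 2 = (n / 2^j) % 2 := by omega
  rw [hmod]

-- enumerating masks 0 .. 2^k-1 and reading their bit characters IS Source B's combos(k)
lemma pvCombosSpec (k : Nat) :
    (List.range (2^k)).map (fun n => (List.range k).map (pvChar n)) = pvCombos k := by
  induction k with
  | zero => rfl
  | succ k ih =>
    have hsplit : List.range (2^(k+1)) = List.range (2^k) ++ (List.range (2^k)).map (2^k + ·) := by
      rw [pow_succ, Nat.mul_two, List.range_add]
    rw [hsplit, List.map_append, List.map_map]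
    have h1 : (List.range (2^k)).map (fun n => (List.range (k+1)).map (pvChar n))
        = (pvCombos k).map (fun a => a ++ ['0']) := by
      rw [← ih, List.map_map]
      refine List.map_congr_left (fun n hn => ?_)
      simp [List.range_succ, pvChar_high k n (List.mem_range.mp hn)]
    have h2 : (List.range (2^k)).map ((fun n => (List.range (k+1)).map (pvChar n)) ∘ (2^k + ·))
        = (pvCombos k).map (fun a => a ++ ['Q']) := by
      rw [← ih, List.map_map]
      refine List.map_congr_left (fun n hn => ?_)
      have hn' : n < 2^k := List.mem_range.mp hn
      simp only [Function.comp]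
      rw [List.range_succ, List.map_append]
      congr 1
      · exact List.map_congr_left (fun j hj => pvChar_low k n j (List.mem_range.mp hj) hn')
      · simp [pvChar_high' k n hn']
    rw [h1, h2]
    simp [pvCombos, List.flatMap_cons, List.flatMap_nil]

-- ===== VERDICT (by name: the statement is the Claim_ definition above) =====
theorem expand_o_variants_py_spec : Claim_equal_expand_o_variants_py := by
  intro s _
  unfold Spec_expand_o_variants_py expand_o_variants_py expand_o_variants_py_alt
  by_cases h : PySem.Str.isIn "O" s = false
  · rw [if_pos h, if_pos h]
  · rw [if_neg h, if_neg h]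
    set idxs0 := ((PySem.List.enumerate s.toList 0).filter (fun p => p.2 == 'O')).map (·.1) with hidxs0
    have hsl : PySem.List.slice idxs0 none (some 6) = idxs0.take 6 := by
      simp [pysem]
    have htr : (if PySem.List.len idxs0 > 6 then PySem.List.slice idxs0 none (some 6) else idxs0)
        = PySem.List.slice idxs0 none (some 6) := by
      split_ifs with hlen
      · rfl
      · rw [hsl]
        refine (List.take_of_length_le ?_).symm
        simp only [PySem.List.len_eq, gt_iff_lt, not_lt] at hlen
        exact_mod_cast hlen
    dsimp only []
    rw [htr]
    set idxs := PySem.List.slice idxs0 none (some 6) with hidxs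
    set k := idxs.length with hk
    rw [PySem.List.foldl_append_singleton_eq_map, PySem.List.foldl_append_singleton_eq_map]
    simp only [List.nil_append]
    rw [PySem.List.pyRange_one, show (((1:Int) <<< k) - 0).toNat = 2^k by
      rw [show ((1:Int) <<< k) = ((1 <<< k : Nat) : Int) from rfl]
      simp only [sub_zero, Int.toNat_natCast, Nat.one_shiftLeft]]
    rw [List.map_map, ← pvCombosSpec k, List.map_map]
    refine List.map_congr_left (fun n _ => ?_)
    simp only [Function.comp, zero_add]
    have hin := pvInner idxs (↑n) 0 s.toList
    simp only [Nat.cast_zero, Nat.zero_add] at hin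
    simp only [← Int.shiftRight_natCast_right]
    rw [hin, pvCharsOfMask]
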